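-- pv_equiv track=rewrite | github.com/KULawHawk/Curator | src/curator/_vendored/ppdeep/__init__.py | _common_substring
-- ===== SOURCE A (Python) =====
-- def _common_substring(s1, s2):
--     ROLL_WINDOW = 7
--     m = len(s1)
--     n = len(s2)
--     res = 0
--
--     for i in range(m):
--         for j in range(n):
--             cur = 0
--             while (i + cur) < m and (j + cur) < n and s1[i + cur] == s2[j + cur]:
--                 cur += 1
--             res = max(res, cur)
--
--     return res >= ROLL_WINDOW
-- ===== SOURCE B (Python) =====
-- def _common_substring(s1, s2):
--     W = 7
--     grams = {s1[i:i + W] for i in range(len(s1) - W + 1)}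
--     return any(s2[j:j + W] in grams for j in range(len(s2) - W + 1))
-- ===== Notes on version B (the rewrite author's own statement) =====
-- stated objective: faster
-- what changed: replaced the cubic all-pairs longest-common-extension scan by hashing every 7-character substring of s1 into a set and checking s2's 7-character substrings against it
import Mathlib
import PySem

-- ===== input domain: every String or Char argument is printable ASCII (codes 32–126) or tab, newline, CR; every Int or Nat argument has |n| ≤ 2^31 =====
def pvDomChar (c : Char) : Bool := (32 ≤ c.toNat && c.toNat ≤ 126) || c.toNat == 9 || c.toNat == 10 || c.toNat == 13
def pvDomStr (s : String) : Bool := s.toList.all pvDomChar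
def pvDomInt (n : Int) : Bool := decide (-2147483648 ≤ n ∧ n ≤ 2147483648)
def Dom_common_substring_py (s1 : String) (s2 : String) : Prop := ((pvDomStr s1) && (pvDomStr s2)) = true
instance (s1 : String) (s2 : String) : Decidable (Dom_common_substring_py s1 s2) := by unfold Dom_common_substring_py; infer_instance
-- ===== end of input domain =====

-- B replaces A's cubic all-pairs common-extension scan by a set of s1's 7-grams probed
-- with s2's 7-grams (objective: faster, asymptotic).

-- ===== PORT A =====
-- the inner 'while' loop of A: extend the match at offsets i+cur / j+cur
def pvExtend (l1 l2 : List Char) (i j cur : Nat) : Nat :=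
  if h : i + cur < l1.length ∧ j + cur < l2.length ∧ l1[i + cur]? = l2[j + cur]? then
    pvExtend l1 l2 i j (cur + 1)
  else
    cur
termination_by l1.length - (i + cur)
decreasing_by omega

def common_substring_py (s1 : String) (s2 : String) : Bool :=
  let l1 := s1.toList
  let l2 := s2.toList
  let res := (List.range l1.length).foldl
    (fun res i => (List.range l2.length).foldl
      (fun res j => max res (pvExtend l1 l2 i j 0)) res) 0
  decide (7 ≤ res)

-- ===== PORT B =====
-- grams = {s1[i:i+7] for i in range(len(s1) - 7 + 1)}; the slice s1[i:i+7] with 0 ≤ i is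
-- (l.drop i).take 7, and Nat-truncated 'l.length + 1 - 7' has exactly the length of
-- Python's range(len - 7 + 1) (empty when len < 7).
def pvGrams (l : List Char) : PySem.Set (List Char) :=
  PySem.Set.ofList ((List.range (l.length + 1 - 7)).map (fun i => (l.drop i).take 7))

def common_substring_py_alt (s1 : String) (s2 : String) : Bool :=
  let l1 := s1.toList
  let l2 := s2.toList
  let grams := pvGrams l1
  (List.range (l2.length + 1 - 7)).any (fun j => PySem.Set.contains grams ((l2.drop j).take 7))

-- ===== PRECONDITION & SPEC =====
def Spec_common_substring_py (s1 : String) (s2 : String) (out : Bool) : Prop := out = common_substring_py_alt s1 s2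
instance (s1 : String) (s2 : String) (out : Bool) : Decidable (Spec_common_substring_py s1 s2 out) := by unfold Spec_common_substring_py; infer_instance

-- ===== CLAIM (what is proved, stated in full; the proofs are below) =====
def Claim_equal_common_substring_py : Prop := ∀ (s1 : String) (s2 : String), Dom_common_substring_py s1 s2 → Spec_common_substring_py s1 s2 (common_substring_py s1 s2)

-- ===== LEMMAS AND PROOFS =====

-- longest common prefix length of two lists
def pvLcp : List Char → List Char → Nat
  | a :: as, b :: bs => if a = b then pvLcp as bs + 1 else 0
  | _, _ => 0

theorem pvLcp_nil_left (ys : List Char) : pvLcp [] ys = 0 := by cases ys <;> rfl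

theorem pvLcp_nil_right (xs : List Char) : pvLcp xs [] = 0 := by cases xs <;> rfl

theorem pvLcp_ge_iff (k : Nat) (xs ys : List Char) :
    k ≤ pvLcp xs ys ↔ xs.take k = ys.take k ∧ k ≤ xs.length ∧ k ≤ ys.length := by
  induction k generalizing xs ys with
  | zero => simp
  | succ k ih =>
    cases xs with
    | nil => simp [pvLcp_nil_left]
    | cons a as =>
      cases ys with
      | nil => simp [pvLcp_nil_right]
      | cons b bs =>
        by_cases hab : a = b
        · subst hab
          simp [pvLcp, ih]
        · simp [pvLcp, hab]

theorem pvExtend_eq (l1 l2 : List Char) (i j cur : Nat) :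
    pvExtend l1 l2 i j cur = cur + pvLcp (l1.drop (i + cur)) (l2.drop (j + cur)) := by
  induction cur using pvExtend.induct (l1 := l1) (l2 := l2) (i := i) (j := j) with
  | case1 cur h ih =>
    rw [pvExtend, dif_pos h]
    obtain ⟨h1, h2, heq⟩ := h
    rw [List.getElem?_eq_getElem h1, List.getElem?_eq_getElem h2] at heq
    rw [List.drop_eq_getElem_cons h1, List.drop_eq_getElem_cons h2]
    simp only [Option.some.injEq] at heq
    rw [ih]
    simp only [pvLcp, if_pos heq]
    rw [show i + (cur + 1) = i + cur + 1 from rfl, show j + (cur + 1) = j + cur + 1 from rfl]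
    omega
  | case2 cur h =>
    rw [pvExtend, dif_neg h]
    push Not at h
    by_cases h1 : i + cur < l1.length
    · by_cases h2 : j + cur < l2.length
      · have hne := h h1 h2
        rw [List.drop_eq_getElem_cons h1, List.drop_eq_getElem_cons h2]
        have : l1[i + cur] ≠ l2[j + cur] := by
          intro he
          exact hne (by rw [List.getElem?_eq_getElem h1, List.getElem?_eq_getElem h2, he])
        simp [pvLcp, this]
      · rw [show l2.drop (j + cur) = [] from List.drop_eq_nil_of_le (by omega), pvLcp_nil_right]
        omega
    · rw [show l1.drop (i + cur) = [] from List.drop_eq_nil_of_le (by omega), pvLcp_nil_left]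
      omega

theorem pvFoldl_ge {α : Type} (step : Nat → α → Nat) (P : α → Prop) (k : Nat)
    (hstep : ∀ r x, k ≤ step r x ↔ k ≤ r ∨ P x) :
    ∀ (l : List α) (a : Nat), k ≤ l.foldl step a ↔ k ≤ a ∨ ∃ x ∈ l, P x := by
  intro l
  induction l with
  | nil => simp
  | cons x xs ih =>
    intro a
    simp only [List.foldl_cons, ih, hstep, List.mem_cons]
    constructor
    · rintro ((h | h) | ⟨y, hy, hP⟩)
      · exact Or.inl h
      · exact Or.inr ⟨x, Or.inl rfl, h⟩
      · exact Or.inr ⟨y, Or.inr hy, hP⟩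
    · rintro (h | ⟨y, (rfl | hy), hP⟩)
      · exact Or.inl (Or.inl h)
      · exact Or.inl (Or.inr hP)
      · exact Or.inr ⟨y, hy, hP⟩

theorem common_substring_py_spec : Claim_equal_common_substring_py := by
  intro s1 s2 _
  unfold Spec_common_substring_py
  unfold common_substring_py common_substring_py_alt
  set l1 := s1.toList with hl1
  set l2 := s2.toList with hl2
  rw [Bool.eq_iff_iff]
  have hinner : ∀ (i : Nat) (a : Nat),
      7 ≤ (List.range l2.length).foldl (fun res j => max res (pvExtend l1 l2 i j 0)) a ↔
        7 ≤ a ∨ ∃ j ∈ List.range l2.length, 7 ≤ pvExtend l1 l2 i j 0 := by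
    intro i a
    exact pvFoldl_ge _ _ 7 (fun r x => by simp) _ a
  have houter :
      7 ≤ (List.range l1.length).foldl
          (fun res i => (List.range l2.length).foldl (fun res j => max res (pvExtend l1 l2 i j 0)) res) 0 ↔
        (0 : Nat) ≥ 7 ∨ ∃ i ∈ List.range l1.length, ∃ j ∈ List.range l2.length, 7 ≤ pvExtend l1 l2 i j 0 :=
    pvFoldl_ge _ (fun i => ∃ j ∈ List.range l2.length, 7 ≤ pvExtend l1 l2 i j 0) 7
      (fun r i => hinner i r) _ 0
  simp only [decide_eq_true_eq, List.any_eq_true, houter, List.mem_range]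
  constructor
  · rintro (h | ⟨i, hi, j, hj, hext⟩)
    · omega
    · rw [pvExtend_eq] at hext
      simp only [Nat.zero_add, Nat.add_zero] at hext
      rw [pvLcp_ge_iff] at hext
      obtain ⟨hgram, hlen1, hlen2⟩ := hext
      rw [List.length_drop] at hlen1 hlen2
      refine ⟨j, by omega, ?_⟩
      rw [PySem.Set.contains_iff]
      unfold pvGrams
      rw [PySem.Set.mem_ofList]
      simp only [List.mem_map, List.mem_range]
      exact ⟨i, by omega, hgram⟩
  · rintro ⟨j, hj, hmem⟩
    rw [PySem.Set.contains_iff] at hmem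
    unfold pvGrams at hmem
    rw [PySem.Set.mem_ofList] at hmem
    simp only [List.mem_map, List.mem_range] at hmem
    obtain ⟨i, hi, hgram⟩ := hmem
    refine Or.inr ⟨i, by omega, j, by omega, ?_⟩
    rw [pvExtend_eq]
    simp only [Nat.zero_add, Nat.add_zero]
    rw [pvLcp_ge_iff]
    exact ⟨hgram, by rw [List.length_drop]; omega, by rw [List.length_drop]; omega⟩
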